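-- pv_equiv track=rewrite | github.com/bruggsy/Cribbage | cribbage.py | checkRuns
-- ===== SOURCE A (Python) =====
-- from operator import mul
-- import functools
--
-- def checkRuns(val):
-- 	unVal = []
-- 	for v in val:
-- 		if v not in unVal:
-- 			unVal.append(v)
-- 	unVal.sort()
-- 	seq = [unVal.pop(0)]
-- 	mult = [val.count(seq[0])]
-- 	for v in unVal:
-- 		if v == seq[len(seq)-1]+1:
-- 			seq.append(v)
-- 			mult.append(val.count(v))
-- 		else:
-- 			if len(seq) > 2:
-- 				break
-- 			seq = [v]
-- 			mult = [val.count(v)]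
-- 	if len(seq) > 2:
-- 		return len(seq) * functools.reduce(mul,mult,1)
-- 	else:
-- 		return 0
-- ===== SOURCE B (Python) =====
-- def checkRuns(val):
-- 	counts = {}
-- 	for v in val:
-- 		counts[v] = counts.get(v, 0) + 1
-- 	best = None  # (start, length, product) of the best qualifying run found so far
-- 	for v in counts:
-- 		if v - 1 not in counts:
-- 			length, prod = 0, 1
-- 			while v + length in counts:
-- 				prod *= counts[v + length]
-- 				length += 1
-- 			if length > 2 and (best is None or v < best[0]):
-- 				best = (v, length, prod)
-- 	if best is None:
-- 		return 0
-- 	return best[1] * best[2]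
-- ===== Notes on version B (the rewrite author's own statement) =====
-- stated objective: faster
-- what changed: B drops A's sort-then-scan entirely: it builds a counting dict once, then for each distinct value that is a run start (v-1 absent) walks upward through hash-membership to get the run length and multiplicity product, keeping the qualifying run with the smallest start (= A's first run in sorted order).
import Mathlib
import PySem

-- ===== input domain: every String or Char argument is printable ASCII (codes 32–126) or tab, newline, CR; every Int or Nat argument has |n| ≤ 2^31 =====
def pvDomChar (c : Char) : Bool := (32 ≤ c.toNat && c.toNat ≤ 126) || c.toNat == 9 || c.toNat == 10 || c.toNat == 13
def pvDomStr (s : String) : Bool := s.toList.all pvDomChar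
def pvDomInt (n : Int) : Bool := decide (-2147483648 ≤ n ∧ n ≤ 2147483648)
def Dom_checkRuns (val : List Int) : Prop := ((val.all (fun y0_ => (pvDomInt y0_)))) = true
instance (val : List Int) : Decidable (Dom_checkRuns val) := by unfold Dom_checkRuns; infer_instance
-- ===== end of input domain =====

-- B drops A's sort-then-scan: it counts into a dict once and, for each distinct value that
-- starts a run (v-1 absent), walks upward by hash membership, keeping the qualifying run
-- with the smallest start (= A's first run in sorted order).

-- ===== PORT A =====
-- the 'for v in unVal' loop of A: state (seq, mult); breaking returns the state
def aLoop (val : List Int) : List Int → List Int → List Int → List Int × List Int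
  | seq, mult, [] => (seq, mult)
  | seq, mult, v :: rest =>
    if v = PySem.List.pyGetD seq ((seq.length : Int) - 1) 0 + 1 then
      aLoop val (seq ++ [v]) (mult ++ [(PySem.List.count val v : Int)]) rest
    else if seq.length > 2 then (seq, mult)
    else aLoop val [v] [(PySem.List.count val v : Int)] rest

def checkRuns (val : List Int) : Int :=
  let unVal := val.foldl (fun acc v => if v ∈ acc then acc else acc ++ [v]) []
  let unVal := PySem.List.sorted unVal (fun x => x) false
  match PySem.List.pop? unVal 0 with
  | none => 0   -- Python: IndexError 'pop from empty list'; excluded by Pre_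
  | some (h, rest) =>
    let p := aLoop val [h] [(PySem.List.count val h : Int)] rest
    if p.1.length > 2 then (p.1.length : Int) * p.2.foldl (· * ·) 1 else 0

-- ===== PORT B =====
-- Source B's inner while loop: walk upward from v while v+length is a key, accumulating
-- (length, product of counts).  The fuel argument only makes the recursion structural:
-- the loop body can succeed at most (number of keys) times, so fuel = d.keys.length
-- is never exhausted before the membership test fails.
def walkB (d : PySem.Dict Int Int) (v : Int) : Nat → Int × Int → Int × Int
  | 0, acc => acc
  | fuel + 1, (len, prod) =>
    if d.contains (v + len) then walkB d v fuel (len + 1, prod * d.getD (v + len) 0)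
    else (len, prod)

-- Source B's loop body over the dict's keys: keep the qualifying run with the smallest start
def bestStep (d : PySem.Dict Int Int) (best : Option (Int × Int × Int)) (v : Int) :
    Option (Int × Int × Int) :=
  if d.contains (v - 1) then best
  else
    let lp := walkB d v d.keys.length (0, 1)
    match best with
    | none => if lp.1 > 2 then some (v, lp.1, lp.2) else none
    | some b => if lp.1 > 2 ∧ v < b.1 then some (v, lp.1, lp.2) else some b

def checkRuns_alt (val : List Int) : Int :=
  let counts := val.foldl (fun d v => d.insert v (d.getD v 0 + 1)) PySem.Dict.empty
  match counts.keys.foldl (bestStep counts) none with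
  | none => 0
  | some b => b.2.1 * b.2.2

-- ===== PRECONDITION & SPEC =====
-- A raises IndexError (pop from an empty list) on the empty hand; only that input is excluded.
def Pre_checkRuns (val : List Int) : Prop := val ≠ []
instance (val : List Int) : Decidable (Pre_checkRuns val) := by unfold Pre_checkRuns; infer_instance
def pvWitness_checkRuns : List Int := [4, 5, 6, 6]

def Spec_checkRuns (val : List Int) (out : Int) : Prop := out = checkRuns_alt val
instance (val : List Int) (out : Int) : Decidable (Spec_checkRuns val out) := by unfold Spec_checkRuns; infer_instance

-- ===== CLAIM (what is proved, stated in full; the proofs are below) =====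
def Claim_equal_checkRuns : Prop := ∀ (val : List Int), Dom_checkRuns val → Pre_checkRuns val → Spec_checkRuns val (checkRuns val)

-- ===== LEMMAS AND PROOFS =====

-- ---- proof device: partition of the sorted distinct values into maximal consecutive runs ----

def bGroup (cur : List Int) : List Int → List (List Int)
  | [] => [cur]
  | v :: rest =>
    if v = PySem.List.pyGetD cur (-1) 0 + 1 then bGroup (cur ++ [v]) rest
    else cur :: bGroup [v] rest

-- first run of length > 2 scores len(run) * product of counts
def bFind (counts : PySem.Dict Int Int) : List (List Int) → Int
  | [] => 0
  | r :: rs =>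
    if r.length > 2 then (r.length : Int) * r.foldl (fun p v => p * counts.getD v 0) 1
    else bFind counts rs

-- ---- A's loop computes bFind of the run partition (proved in the previous style) ----

theorem dedup_eq (val : List Int) :
    val.foldl (fun acc v => if v ∈ acc then acc else acc ++ [v]) [] = PySem.Set.ofList val := by
  rw [PySem.Set.ofList_eq_foldl]
  congr 1
  funext acc v
  rw [PySem.Set.add_eq_ite]

theorem counts_eq (val : List Int) :
    val.foldl (fun d v => d.insert v (d.getD v 0 + 1)) PySem.Dict.empty = PySem.Dict.counter val := by
  exact PySem.Dict.foldl_insert_getD_add_one_eq_counter val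

theorem lastIdx (cur : List Int) (h : cur ≠ []) :
    PySem.List.pyGetD cur ((cur.length : Int) - 1) 0 = PySem.List.pyGetD cur (-1) 0 := by
  have hl : 0 < cur.length := List.length_pos_iff.mpr h
  rw [PySem.List.pyGetD_neg_one cur 0 h,
    PySem.List.pyGetD_eq_getElem cur (i := (cur.length : Int) - 1) 0 (by omega) (by omega)]
  have ht : ((cur.length : Int) - 1).toNat = cur.length - 1 := by omega
  simp only [ht]
  exact (List.getLast_eq_getElem h).symm

theorem prod_eq (val cur : List Int) :
    (cur.map (fun v => (PySem.List.count val v : Int))).foldl (· * ·) 1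
    = cur.foldl (fun p v => p * (PySem.Dict.counter val).getD v 0) 1 := by
  rw [List.foldl_map]
  simp [PySem.Dict.getD_counter, PySem.List.count_eq]

theorem main_lemma (val : List Int) : ∀ (t cur : List Int), cur ≠ [] →
    (let p := aLoop val cur (cur.map (fun v => (PySem.List.count val v : Int))) t;
     if p.1.length > 2 then (p.1.length : Int) * p.2.foldl (· * ·) 1 else 0)
    = bFind (PySem.Dict.counter val) (bGroup cur t) := by
  intro t
  induction t with
  | nil =>
    intro cur hc
    simp only [aLoop, bGroup, bFind]
    split_ifs with h1
    · rw [prod_eq]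
    · rfl
  | cons v rest ih =>
    intro cur hc
    simp only [aLoop, bGroup, lastIdx cur hc]
    by_cases hv : v = PySem.List.pyGetD cur (-1) 0 + 1
    · simp only [if_pos hv]
      have := ih (cur ++ [v]) (by simp)
      simpa [List.map_append] using this
    · simp only [if_neg hv, bFind]
      by_cases h2 : cur.length > 2
      · simp only [if_pos h2]
        rw [prod_eq]
      · simp only [if_neg h2]
        simpa using ih [v] (by simp)

-- ---- facts about pyRange intervals ----

theorem pyRange_ne_nil (u f : Int) (h : u < f) : PySem.List.pyRange u f ≠ [] := by
  intro hc
  have := PySem.List.length_pyRange_one u f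
  rw [hc] at this
  simp at this
  omega

theorem pyRange_empty (u f : Int) (h : f ≤ u) : PySem.List.pyRange u f = [] := by
  apply List.length_eq_zero_iff.mp
  rw [PySem.List.length_pyRange_one]
  omega

theorem pyRange_singleton (v : Int) : PySem.List.pyRange v (v + 1) = [v] := by
  rw [PySem.List.pyRange_one_cons (by omega), pyRange_empty (v + 1) (v + 1) le_rfl]

theorem pyGetD_last_pyRange (u f : Int) (h : u < f) :
    PySem.List.pyGetD (PySem.List.pyRange u f) (-1) 0 = f - 1 := by
  rw [PySem.List.pyGetD_neg_one _ 0 (pyRange_ne_nil u f h)]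
  have hsplit : PySem.List.pyRange u f = PySem.List.pyRange u (f - 1) ++ [f - 1] := by
    have := PySem.List.pyRange_one_succ_right (a := u) (b := f - 1) (by omega)
    simpa using this
  have h2 : (PySem.List.pyRange u (f - 1) ++ [f - 1]) ≠ [] := by simp
  rw [List.getLast_congr _ h2 hsplit, List.getLast_append]
  simp

theorem length_pyRange_int (u f : Int) (h : u ≤ f) :
    ((PySem.List.pyRange u f).length : Int) = f - u := by
  rw [PySem.List.length_pyRange_one]; omega

-- ---- structure of bGroup on a strictly increasing list ----
theorem bGroup_main : ∀ (t : List Int) (s e : Int), s < e →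
    (PySem.List.pyRange s e ++ t).Pairwise (· < ·) →
    (bGroup (PySem.List.pyRange s e) t).flatten = PySem.List.pyRange s e ++ t ∧
    ∀ g ∈ bGroup (PySem.List.pyRange s e) t, ∃ u f, u < f ∧ g = PySem.List.pyRange u f ∧ s ≤ u ∧
      (u = s ∨ (u - 1) ∉ (PySem.List.pyRange s e ++ t)) ∧ f ∉ (PySem.List.pyRange s e ++ t) := by
  intro t
  induction t with
  | nil =>
    intro s e hse _
    refine ⟨by simp [bGroup], ?_⟩
    intro g hg
    simp only [bGroup, List.mem_singleton] at hg
    subst hg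
    refine ⟨s, e, hse, rfl, le_rfl, Or.inl rfl, ?_⟩
    simp [PySem.List.mem_pyRange_one]
  | cons v t' ih =>
    intro s e hse hpair
    rcases List.pairwise_append.mp hpair with ⟨_, hp2, hcross⟩
    rcases List.pairwise_cons.mp hp2 with ⟨hvt', _⟩
    have hev : e ≤ v := by
      have := hcross (e - 1) (by rw [PySem.List.mem_pyRange_one]; omega) v List.mem_cons_self
      omega
    simp only [bGroup, pyGetD_last_pyRange s e hse]
    by_cases hv : v = e
    · subst hv
      rw [if_pos (by omega)]
      have hsnoc : PySem.List.pyRange s (v + 1) = PySem.List.pyRange s v ++ [v] :=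
        PySem.List.pyRange_one_succ_right (le_of_lt hse)
      have hlist : PySem.List.pyRange s (v + 1) ++ t' = PySem.List.pyRange s v ++ v :: t' := by
        rw [hsnoc, List.append_assoc, List.singleton_append]
      rw [← hsnoc, ← hlist]
      exact ih s (v + 1) (by omega) (by rw [hlist]; exact hpair)
    · rw [if_neg (by omega)]
      have hveq : [v] = PySem.List.pyRange v (v + 1) := (pyRange_singleton v).symm
      have hlist2 : PySem.List.pyRange v (v + 1) ++ t' = v :: t' := by
        rw [pyRange_singleton, List.singleton_append]
      obtain ⟨ihf, ihp⟩ := ih v (v + 1) (by omega) (by rw [hlist2]; exact hp2)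
      rw [hlist2] at ihf ihp
      constructor
      · simp only [hveq, List.flatten_cons, ihf]
      · intro g hg
        rcases List.mem_cons.mp hg with rfl | hmem
        · refine ⟨s, e, hse, rfl, le_rfl, Or.inl rfl, ?_⟩
          intro hc
          rcases List.mem_append.mp hc with hc1 | hc2
          · rw [PySem.List.mem_pyRange_one] at hc1; omega
          · rcases List.mem_cons.mp hc2 with rfl | hc3
            · omega
            · exact absurd (hvt' _ hc3) (by omega)
        · rw [hveq] at hmem
          obtain ⟨u, f, huf, hgu, hvu, hstart, hend⟩ := ihp g hmem
          refine ⟨u, f, huf, hgu, by omega, Or.inr ?_, ?_⟩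
          · intro hc
            rcases List.mem_append.mp hc with hc1 | hc2
            · rw [PySem.List.mem_pyRange_one] at hc1; omega
            · rcases hstart with rfl | hstart'
              · rcases List.mem_cons.mp hc2 with h' | hc3
                · omega
                · exact absurd (hvt' _ hc3) (by omega)
              · exact hstart' hc2
          · intro hc
            rcases List.mem_append.mp hc with hc1 | hc2
            · rw [PySem.List.mem_pyRange_one] at hc1; omega
            · exact hend hc2

-- bFind is a find-first over the runs
theorem bFind_eq_find (d : PySem.Dict Int Int) (gs : List (List Int)) :
    bFind d gs = match gs.find? (fun g => decide (g.length > 2)) with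
      | none => 0
      | some g => (g.length : Int) * g.foldl (fun p v => p * d.getD v 0) 1 := by
  induction gs with
  | nil => rfl
  | cons g gs ih =>
    simp only [bFind, List.find?]
    by_cases h : g.length > 2
    · simp [h]
    · simp [h, ih]

-- the run found by find? is minimal among qualifying runs
theorem find_min (gs : List (List Int)) (p : List Int → Bool)
    (hord : gs.Pairwise (fun g g' => ∀ x ∈ g, ∀ y ∈ g', x < y))
    (g : List Int) (hF : gs.find? p = some g) :
    ∀ g' ∈ gs, p g' = true → g = g' ∨ (∀ x ∈ g, ∀ y ∈ g', x < y) := by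
  induction gs with
  | nil => simp at hF
  | cons a gs ih =>
    rcases List.pairwise_cons.mp hord with ⟨ha, htl⟩
    by_cases hp : p a = true
    · rw [List.find?_cons_of_pos hp] at hF
      injection hF with hF; subst hF
      intro g' hg' _
      rcases List.mem_cons.mp hg' with rfl | hmem
      · exact Or.inl rfl
      · exact Or.inr (ha g' hmem)
    · rw [List.find?_cons_of_neg (by simpa using hp)] at hF
      intro g' hg' hpg'
      rcases List.mem_cons.mp hg' with rfl | hmem
      · exact absurd hpg' hp
      · exact ih htl hF g' hmem hpg'

-- generic preservation of an invariant by a fold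
theorem foldl_pres {α β : Type} (f : β → α → β) (P : β → Prop) :
    ∀ (l : List α) (b : β), (∀ x ∈ l, ∀ acc, P acc → P (f acc x)) → P b → P (l.foldl f b) := by
  intro l
  induction l with
  | nil => intro b _ hb; exact hb
  | cons x xs ih =>
    intro b hstep hb
    exact ih (f b x) (fun y hy acc => hstep y (List.mem_cons_of_mem x hy) acc)
      (hstep x List.mem_cons_self b hb)

-- the while loop walks exactly a maximal chain
theorem walkB_run (d : PySem.Dict Int Int) (v : Int) :
    ∀ (m : Nat) (fuel : Nat) (len p : Int),
    (∀ x : Int, v + len ≤ x → x < v + len + m → d.contains x = true) →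
    d.contains (v + len + m) = false → m ≤ fuel →
    walkB d v fuel (len, p) =
      (len + m, (PySem.List.pyRange (v + len) (v + len + m)).foldl (fun q x => q * d.getD x 0) p) := by
  intro m
  induction m with
  | zero =>
    intro fuel len p _ hend _
    have hend' : d.contains (v + len) = false := by simpa using hend
    cases fuel with
    | zero => simp only [walkB]; simp
    | succ f => simp only [walkB, hend']; simp
  | succ m ih =>
    intro fuel len p hchain hend hle
    cases fuel with
    | zero => omega
    | succ f =>
      have h0 : d.contains (v + len) = true := hchain _ le_rfl (by push_cast; omega)
      simp only [walkB, h0, if_true]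
      have hrec := ih f (len + 1) (p * d.getD (v + len) 0)
        (fun x hx1 hx2 => hchain x (by omega) (by push_cast at hx2 ⊢; omega))
        (by have : v + (len + 1) + (m : Int) = v + len + ((m : Nat) + 1 : Nat) := by push_cast; ring
            rw [this]; exact hend)
        (by omega)
      rw [hrec]
      have hcons : PySem.List.pyRange (v + len) (v + len + ((m : Nat) + 1 : Nat))
          = (v + len) :: PySem.List.pyRange (v + len + 1) (v + (len + 1) + m) := by
        rw [PySem.List.pyRange_one_cons (by push_cast; omega)]
        congr 1
        push_cast
        ring
      rw [hcons]
      simp only [List.foldl_cons]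
      have e1 : v + len + 1 = v + (len + 1) := by ring
      have e2 : len + 1 + (m : Int) = len + (((m : Nat) + 1 : Nat) : Int) := by push_cast; ring
      rw [e1, e2]

-- the run partition scored by bFind equals B's argmin-over-run-starts fold
theorem bridge (D : PySem.Dict Int Int) (h : Int) (rest : List Int)
    (hL : (h :: rest).Pairwise (· < ·))
    (hmem : ∀ x : Int, D.contains x = true ↔ x ∈ h :: rest)
    (hkeys : D.keys.Perm (h :: rest)) :
    bFind D (bGroup [h] rest) =
      (match D.keys.foldl (bestStep D) none with
       | none => 0
       | some b => b.2.1 * b.2.2) := by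
  have h1 : [h] = PySem.List.pyRange h (h + 1) := (pyRange_singleton h).symm
  have hl1 : PySem.List.pyRange h (h + 1) ++ rest = h :: rest := by
    rw [pyRange_singleton, List.singleton_append]
  obtain ⟨hflat, hprops⟩ := bGroup_main rest h (h + 1) (by omega) (by rw [hl1]; exact hL)
  rw [hl1] at hflat hprops
  rw [h1]
  set gs := bGroup (PySem.List.pyRange h (h + 1)) rest with hgs
  have hmin : ∀ y ∈ h :: rest, h ≤ y := by
    intro y hy
    rcases List.mem_cons.mp hy with rfl | hy'
    · exact le_rfl
    · exact le_of_lt ((List.pairwise_cons.mp hL).1 y hy')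
  have props : ∀ g ∈ gs, ∃ u f, u < f ∧ g = PySem.List.pyRange u f ∧
      (u - 1) ∉ (h :: rest) ∧ f ∉ (h :: rest) := by
    intro g hg
    obtain ⟨u, f, huf, hgu, _, hstart, hend⟩ := hprops g hg
    refine ⟨u, f, huf, hgu, ?_, hend⟩
    rcases hstart with rfl | hs
    · intro hc; have := hmin _ hc; omega
    · exact hs
  have hord : gs.Pairwise (fun g g' => ∀ x ∈ g, ∀ y ∈ g', x < y) := by
    have := List.pairwise_flatten.mp (hflat ▸ hL)
    exact this.2
  have hmemflat : ∀ x : Int, x ∈ h :: rest ↔ ∃ g ∈ gs, x ∈ g := by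
    intro x; rw [← hflat, List.mem_flatten]
  have hsub : ∀ g ∈ gs, ∀ x ∈ g, x ∈ h :: rest := fun g hg x hx => (hmemflat x).mpr ⟨g, hg, hx⟩
  have hcf : ∀ x : Int, x ∉ (h :: rest) → D.contains x = false := by
    intro x hx
    cases hcx : D.contains x with
    | false => rfl
    | true => exact absurd ((hmem x).mp hcx) hx
  have hlen : ∀ g ∈ gs, g.length ≤ D.keys.length := by
    intro g hg
    have hsl : g.Sublist (h :: rest) := hflat ▸ List.sublist_flatten_of_mem hg
    calc g.length ≤ (h :: rest).length := hsl.length_le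
      _ = D.keys.length := hkeys.length_eq.symm
  have hwalk : ∀ v ∈ h :: rest, D.contains (v - 1) = false →
      ∃ f, v < f ∧ PySem.List.pyRange v f ∈ gs ∧ f ∉ (h :: rest) ∧
        walkB D v D.keys.length (0, 1) =
          (f - v, (PySem.List.pyRange v f).foldl (fun q x => q * D.getD x 0) 1) := by
    intro v hv hnc
    obtain ⟨g, hg, hvg⟩ := (hmemflat v).mp hv
    obtain ⟨u, f, huf, rfl, hstart, hend⟩ := props g hg
    rw [PySem.List.mem_pyRange_one] at hvg
    have huv : u = v := by
      by_contra hne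
      have hm1 : (v - 1) ∈ PySem.List.pyRange u f :=
        PySem.List.mem_pyRange_one.mpr (by omega)
      have hm2 : (v - 1) ∈ h :: rest := hsub _ hg _ hm1
      have := (hmem (v - 1)).mpr hm2
      rw [hnc] at this
      exact absurd this (by simp)
    subst huv
    refine ⟨f, huf, hg, hend, ?_⟩
    have hm : ((f - u).toNat : Int) = f - u := by omega
    have hrun := walkB_run D u (f - u).toNat D.keys.length 0 1
      (fun x hx1 hx2 => (hmem x).mpr (hsub _ hg _
        (PySem.List.mem_pyRange_one.mpr ⟨by omega, by omega⟩)))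
      (by
        have e1 : u + 0 + ((f - u).toNat : Int) = f := by omega
        rw [e1]
        exact hcf f hend)
      (by
        have : (f - u).toNat = (PySem.List.pyRange u f).length := by
          rw [PySem.List.length_pyRange_one]
        rw [this]
        exact hlen _ hg)
    have e1 : u + 0 + ((f - u).toNat : Int) = f := by omega
    have e2 : (0 : Int) + ((f - u).toNat : Int) = f - u := by omega
    have e0 : u + (0 : Int) = u := by ring
    rw [e1, e2, e0] at hrun
    exact hrun
  rw [bFind_eq_find]
  cases hF : gs.find? (fun g => decide (g.length > 2)) with
  | none =>
    have hnone : D.keys.foldl (bestStep D) none = none := by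
      apply foldl_pres _ (fun acc => acc = none) _ none ?_ rfl
      intro x hx acc hacc
      subst hacc
      simp only [bestStep]
      by_cases hc : D.contains (x - 1) = true
      · simp [hc]
      · have hc' : D.contains (x - 1) = false := by simpa using hc
        rw [if_neg (by simp [hc'])]
        have hxL : x ∈ h :: rest := hkeys.mem_iff.mp hx
        obtain ⟨f, hxf, hgin, _, hw⟩ := hwalk x hxL hc'
        rw [hw]
        have hnb := List.find?_eq_none.mp hF _ hgin
        rw [PySem.List.length_pyRange_one] at hnb
        rw [if_neg (by simp at hnb; omega)]
    rw [hnone]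
  | some g =>
    have hgmem : g ∈ gs := List.mem_of_find?_eq_some hF
    obtain ⟨u, f, huf, rfl, hu1, hu2⟩ := props g hgmem
    have hbig := List.find?_some hF
    rw [decide_eq_true_iff, PySem.List.length_pyRange_one] at hbig
    have hfu : (2 : Int) < f - u := by omega
    have huL : u ∈ h :: rest :=
      hsub _ hgmem u (PySem.List.mem_pyRange_one.mpr ⟨le_rfl, by omega⟩)
    -- any two groups are equal or elementwise ordered
    have pairmem : ∀ (g₁ g₂ : List Int), g₁ ∈ gs → g₂ ∈ gs →
        g₁ = g₂ ∨ (∀ x ∈ g₁, ∀ y ∈ g₂, x < y) ∨ (∀ x ∈ g₂, ∀ y ∈ g₁, x < y) := by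
      intro g₁ g₂ hg₁ hg₂
      obtain ⟨i, hi, rfl⟩ := List.getElem_of_mem hg₁
      obtain ⟨j, hj, rfl⟩ := List.getElem_of_mem hg₂
      rcases lt_trichotomy i j with hij | hij | hij
      · exact Or.inr (Or.inl (List.pairwise_iff_getElem.mp hord i j hi hj hij))
      · exact Or.inl (by subst hij; rfl)
      · exact Or.inr (Or.inr (List.pairwise_iff_getElem.mp hord j i hj hi hij))
    -- a group is determined by its start
    have huniq2 : ∀ w fw fw', w < fw → w < fw' →
        PySem.List.pyRange w fw ∈ gs → PySem.List.pyRange w fw' ∈ gs → fw = fw' := by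
      intro w fw fw' hwf hwf' hin hin'
      have hwmem : w ∈ PySem.List.pyRange w fw := PySem.List.mem_pyRange_one.mpr ⟨le_rfl, by omega⟩
      have hwmem' : w ∈ PySem.List.pyRange w fw' := PySem.List.mem_pyRange_one.mpr ⟨le_rfl, by omega⟩
      rcases pairmem _ _ hin hin' with heq | hlt | hlt
      · have := congrArg List.length heq
        rw [PySem.List.length_pyRange_one, PySem.List.length_pyRange_one] at this
        omega
      · exact absurd (hlt w hwmem w hwmem') (by omega)
      · exact absurd (hlt w hwmem' w hwmem) (by omega)
    -- minimality of u among qualifying run starts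
    have hminq : ∀ w fw, w < fw → PySem.List.pyRange w fw ∈ gs → (2 : Int) < fw - w → u ≤ w := by
      intro w fw hwf hwin hwbig
      have hq : (fun g => decide (g.length > 2)) (PySem.List.pyRange w fw) = true := by
        rw [decide_eq_true_iff, PySem.List.length_pyRange_one]; omega
      rcases find_min gs _ hord _ hF _ hwin hq with heq | hlt
      · have hwm : w ∈ PySem.List.pyRange u f := by
          rw [heq]; exact PySem.List.mem_pyRange_one.mpr ⟨le_rfl, by omega⟩
        rw [PySem.List.mem_pyRange_one] at hwm
        omega
      · have := hlt u (PySem.List.mem_pyRange_one.mpr ⟨le_rfl, by omega⟩)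
          w (PySem.List.mem_pyRange_one.mpr ⟨le_rfl, by omega⟩)
        omega
    set tgt : Option (Int × Int × Int) :=
      some (u, f - u, (PySem.List.pyRange u f).foldl (fun q x => q * D.getD x 0) 1) with htgt
    set P1 : Option (Int × Int × Int) → Prop := (fun acc => acc = none ∨
      ∃ w fw, w < fw ∧ PySem.List.pyRange w fw ∈ gs ∧ (2 : Int) < fw - w ∧ u ≤ w ∧
        acc = some (w, fw - w, (PySem.List.pyRange w fw).foldl (fun q x => q * D.getD x 0) 1))
      with hP1
    have hstep1 : ∀ x ∈ D.keys, ∀ acc, P1 acc → P1 (bestStep D acc x) := by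
      intro x hx acc hacc
      simp only [hP1] at hacc ⊢
      have hxL : x ∈ h :: rest := hkeys.mem_iff.mp hx
      rcases hacc with rfl | ⟨w, fw, hwf, hwin, hwbig, huw, rfl⟩
      · simp only [bestStep]
        by_cases hc : D.contains (x - 1) = true
        · simp [hc]
        · have hc' : D.contains (x - 1) = false := by simpa using hc
          rw [if_neg (by simp [hc'])]
          obtain ⟨fx, hxf, hgin, _, hw⟩ := hwalk x hxL hc'
          rw [hw]
          by_cases hxbig : (2 : Int) < fx - x
          · rw [if_pos (by omega)]
            exact Or.inr ⟨x, fx, hxf, hgin, hxbig, hminq x fx hxf hgin hxbig, rfl⟩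
          · rw [if_neg (by omega)]
            exact Or.inl rfl
      · simp only [bestStep]
        by_cases hc : D.contains (x - 1) = true
        · rw [if_pos hc]
          exact Or.inr ⟨w, fw, hwf, hwin, hwbig, huw, rfl⟩
        · have hc' : D.contains (x - 1) = false := by simpa using hc
          rw [if_neg (by simp [hc'])]
          obtain ⟨fx, hxf, hgin, _, hw⟩ := hwalk x hxL hc'
          rw [hw]
          by_cases hxbig : (2 : Int) < fx - x
          · by_cases hcmp : x < w
            · rw [if_pos ⟨by omega, hcmp⟩]
              exact Or.inr ⟨x, fx, hxf, hgin, hxbig, hminq x fx hxf hgin hxbig, rfl⟩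
            · rw [if_neg (fun hcc => hcmp hcc.2)]
              exact Or.inr ⟨w, fw, hwf, hwin, hwbig, huw, rfl⟩
          · rw [if_neg (fun hcc => hxbig hcc.1)]
            exact Or.inr ⟨w, fw, hwf, hwin, hwbig, huw, rfl⟩
    have hstep2 : ∀ x ∈ D.keys, bestStep D tgt x = tgt := by
      intro x hx
      rw [htgt]
      simp only [bestStep]
      by_cases hc : D.contains (x - 1) = true
      · simp [hc]
      · have hc' : D.contains (x - 1) = false := by simpa using hc
        rw [if_neg (by simp [hc'])]
        have hxL : x ∈ h :: rest := hkeys.mem_iff.mp hx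
        obtain ⟨fx, hxf, hgin, _, hw⟩ := hwalk x hxL hc'
        rw [hw]
        by_cases hxbig : (2 : Int) < fx - x
        · rw [if_neg (fun hcc => absurd hcc.2 (not_lt.mpr (hminq x fx hxf hgin hxbig)))]
        · rw [if_neg (fun hcc => hxbig hcc.1)]
    have hhit : ∀ acc, P1 acc → bestStep D acc u = tgt := by
      intro acc hacc
      simp only [hP1] at hacc
      have hc' : D.contains (u - 1) = false := hcf _ hu1
      obtain ⟨fx, hxf, hgin, _, hw⟩ := hwalk u huL hc'
      have hfx : fx = f := huniq2 u fx f hxf huf hgin hgmem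
      subst hfx
      rcases hacc with rfl | ⟨w, fw, hwf, hwin, hwbig, huw, rfl⟩
      · simp only [bestStep]
        rw [if_neg (by simp [hc']), hw, if_pos (by omega), htgt]
      · simp only [bestStep]
        rw [if_neg (by simp [hc']), hw]
        by_cases hcw : u < w
        · rw [if_pos ⟨by omega, hcw⟩, htgt]
        · have hwu : w = u := le_antisymm (by omega) huw
          subst hwu
          rw [if_neg (fun hcc => hcw hcc.2)]
          have hfw : fw = fx := huniq2 w fw fx hwf hxf hwin hgin
          subst hfw
          rw [htgt]
    obtain ⟨k1, k2, hk⟩ := List.append_of_mem (hkeys.mem_iff.mpr huL)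
    have hfold : D.keys.foldl (bestStep D) none = tgt := by
      rw [hk, List.foldl_append, List.foldl_cons]
      have hacc1 : P1 (k1.foldl (bestStep D) none) :=
        foldl_pres _ P1 k1 none
          (fun x hx acc ha => hstep1 x (by rw [hk]; exact List.mem_append_left _ hx) acc ha)
          (Or.inl rfl)
      rw [hhit _ hacc1]
      exact foldl_pres _ (fun acc => acc = tgt) k2 tgt
        (fun x hx acc ha => by
          subst ha
          exact hstep2 x (by rw [hk]; exact List.mem_append_right _ (List.mem_cons_of_mem _ hx)))
        rfl
    rw [hfold, htgt]
    show ((PySem.List.pyRange u f).length : Int) * (PySem.List.pyRange u f).foldl (fun p v => p * D.getD v 0) 1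
      = (f - u) * (PySem.List.pyRange u f).foldl (fun q x => q * D.getD x 0) 1
    rw [length_pyRange_int u f (le_of_lt huf)]

-- ===== VERDICT (by name: the statement is the Claim_ definition above) =====
theorem checkRuns_spec : Claim_equal_checkRuns := by
  intro val _ hpre
  unfold Spec_checkRuns checkRuns checkRuns_alt
  obtain ⟨v, t, rfl⟩ := List.exists_cons_of_ne_nil hpre
  simp only [dedup_eq, counts_eq, PySem.Dict.keys_counter]
  have hne : PySem.List.sorted (PySem.Set.ofList (v :: t)) (fun x => x) false ≠ [] := by
    rw [Ne, PySem.List.sorted_eq_nil_iff]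
    rw [PySem.Set.ofList_cons]
    exact List.cons_ne_nil _ _
  obtain ⟨h, rest, hs⟩ := List.exists_cons_of_ne_nil hne
  rw [hs]
  simp only [PySem.List.pop?_zero_cons]
  have hL : (h :: rest).Pairwise (· < ·) := hs ▸ PySem.List.sorted_ofList_pairwise_lt (v :: t)
  have hmem : ∀ x : Int, (PySem.Dict.counter (v :: t)).contains x = true ↔ x ∈ h :: rest := by
    intro x
    rw [PySem.Dict.contains_counter, ← hs, PySem.List.mem_sorted, PySem.Set.mem_ofList]
    simp
  have hkeys : (PySem.Dict.counter (v :: t)).keys.Perm (h :: rest) := by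
    rw [PySem.Dict.keys_counter, ← hs]
    exact (PySem.List.sorted_perm _ _ _).symm
  have hbr := bridge (PySem.Dict.counter (v :: t)) h rest hL hmem hkeys
  rw [PySem.Dict.keys_counter] at hbr
  have hmain := main_lemma (v :: t) rest [h] (by simp)
  have := hmain.trans hbr
  simpa using this
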